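-- pv_equiv track=rewrite | github.com/xguse/crunchers | src/crunchers/statsmodels_helpers/lazy_stats.py | identify_full_ctrl_names
-- ===== SOURCE A (Python) =====
-- def identify_full_ctrl_names(X_vars, orig_ctrl_names):
--     """Return set of variable names actually used in regression, tolerating mangling of categoricals."""
--     X_vars = set(X_vars)
--
--     ctrls = []
--     for X_var in X_vars:
--         for orig_ctrl in orig_ctrl_names:
--             if X_var == orig_ctrl:
--                 ctrls.append(X_var)
--
--             elif X_var.startswith(orig_ctrl) and (X_var.startswith('C(') and X_var.endswith(']')):
--                 ctrls.append(X_var)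
--
--             else:
--                 pass
--
--     return set(ctrls)
-- ===== SOURCE B (Python) =====
-- def identify_full_ctrl_names(X_vars, orig_ctrl_names):
--     """Return set of variable names actually used in regression, tolerating mangling of categoricals."""
--     ctrl_set = set(orig_ctrl_names)
--     result = set()
--     for x in set(X_vars):
--         if x in ctrl_set:
--             result.add(x)
--         elif x.startswith('C(') and x.endswith(']'):
--             if any(x[:l] in ctrl_set for l in range(len(x) + 1)):
--                 result.add(x)
--     return result
-- ===== Notes on version B (the rewrite author's own statement) =====
-- stated objective: faster
-- what changed: Replaces the nested scan over all (X_var, control) pairs by a hash set of control names queried once for exact matches and once per prefix of each mangled 'C(...]' variable, so the inner loop over orig_ctrl_names disappears.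
import Mathlib
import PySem

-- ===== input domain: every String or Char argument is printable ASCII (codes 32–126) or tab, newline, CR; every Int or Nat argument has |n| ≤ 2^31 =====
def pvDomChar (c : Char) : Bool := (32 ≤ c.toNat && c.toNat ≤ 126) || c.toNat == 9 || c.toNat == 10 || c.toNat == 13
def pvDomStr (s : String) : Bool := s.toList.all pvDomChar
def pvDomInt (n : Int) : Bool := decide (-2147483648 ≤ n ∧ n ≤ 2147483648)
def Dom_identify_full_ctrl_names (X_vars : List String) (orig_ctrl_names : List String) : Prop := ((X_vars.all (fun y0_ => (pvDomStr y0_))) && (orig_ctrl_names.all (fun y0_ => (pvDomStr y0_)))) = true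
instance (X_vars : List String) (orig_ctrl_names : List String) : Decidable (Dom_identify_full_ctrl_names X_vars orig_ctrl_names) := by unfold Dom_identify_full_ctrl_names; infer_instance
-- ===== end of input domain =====

-- B replaces A's nested scan over all (X_var, control) pairs by one hash set of control
-- names, queried for exact membership and once per prefix of each 'C(...]' variable (objective: faster).

-- ===== PORT A =====
def identify_full_ctrl_names (X_vars : List String) (orig_ctrl_names : List String) : List String :=
  let xv : PySem.Set String := PySem.Set.ofList X_vars
  let ctrls : List String :=
    xv.foldl (fun acc X_var =>
      orig_ctrl_names.foldl (fun acc orig_ctrl =>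
        if X_var == orig_ctrl then acc ++ [X_var]
        else if PySem.Str.startswith X_var orig_ctrl &&
                (PySem.Str.startswith X_var "C(" && PySem.Str.endswith X_var "]") then
          acc ++ [X_var]
        else acc) acc) []
  PySem.Set.ofList ctrls

-- ===== PORT B =====
def identify_full_ctrl_names_alt (X_vars : List String) (orig_ctrl_names : List String) : List String :=
  let ctrl_set : PySem.Set String := PySem.Set.ofList orig_ctrl_names
  (PySem.Set.ofList X_vars).foldl (fun result x =>
    if PySem.Set.contains ctrl_set x then PySem.Set.add result x
    else if PySem.Str.startswith x "C(" && PySem.Str.endswith x "]" then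
      if (PySem.List.pyRange 0 (PySem.Str.len x + 1) 1).any
           (fun l => PySem.Set.contains ctrl_set (PySem.Str.slice x none (some l))) then
        PySem.Set.add result x
      else result
    else result) []

-- ===== PRECONDITION & SPEC =====
def Spec_identify_full_ctrl_names (X_vars : List String) (orig_ctrl_names : List String) (out : List String) : Prop := out = identify_full_ctrl_names_alt X_vars orig_ctrl_names
instance (X_vars : List String) (orig_ctrl_names : List String) (out : List String) : Decidable (Spec_identify_full_ctrl_names X_vars orig_ctrl_names out) := by unfold Spec_identify_full_ctrl_names; infer_instance

-- ===== CLAIM (what is proved, stated in full; the proofs are below) =====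
def Claim_equal_identify_full_ctrl_names : Prop := ∀ (X_vars : List String) (orig_ctrl_names : List String), Dom_identify_full_ctrl_names X_vars orig_ctrl_names → Spec_identify_full_ctrl_names X_vars orig_ctrl_names (identify_full_ctrl_names X_vars orig_ctrl_names)

-- ===== LEMMAS AND PROOFS =====

-- A's per-pair match condition, and the whole-row condition.
def pvP (x c : String) : Bool :=
  x == c || (PySem.Str.startswith x c &&
    (PySem.Str.startswith x "C(" && PySem.Str.endswith x "]"))

def pvMatch (orig : List String) (x : String) : Bool := orig.any (pvP x)

theorem pv_add_add_self (s : PySem.Set String) (x : String) :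
    PySem.Set.add (PySem.Set.add s x) x = PySem.Set.add s x := by
  have h2 : (PySem.Set.add s x).contains x = true := by
    rw [PySem.Set.contains_iff, PySem.Set.mem_add]; right; rfl
  have hdef : PySem.Set.add (PySem.Set.add s x) x
      = if (PySem.Set.add s x).contains x = true then PySem.Set.add s x
        else (PySem.Set.add s x) ++ [x] := rfl
  rw [hdef, if_pos h2]

theorem pv_update_replicate (s : PySem.Set String) (x : String) (n : Nat) :
    PySem.Set.update s (List.replicate (n + 1) x) = PySem.Set.add s x := by
  induction n generalizing s with
  | zero => rfl
  | succ k ih =>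
      have h : List.replicate (k + 1 + 1) x = x :: List.replicate (k + 1) x := rfl
      rw [h, PySem.Set.update_cons, ih, pv_add_add_self]

-- updating by a constant block: add once if the block is nonempty.
theorem pv_update_block (s : PySem.Set String) (orig : List String) (x : String) :
    PySem.Set.update s ((orig.filter (pvP x)).map (fun _ => x)) =
    (if pvMatch orig x then PySem.Set.add s x else s) := by
  have hmc : (orig.filter (pvP x)).map (fun _ => x)
      = List.replicate (orig.filter (pvP x)).length x := List.map_const
  by_cases h : pvMatch orig x
  · have hne : orig.filter (pvP x) ≠ [] := by
      simp only [pvMatch, List.any_eq_true] at h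
      obtain ⟨c, hc, hpc⟩ := h
      exact List.ne_nil_of_mem (List.mem_filter.mpr ⟨hc, hpc⟩)
    obtain ⟨k, hk⟩ : ∃ k, (orig.filter (pvP x)).length = k + 1 := by
      cases hl : (orig.filter (pvP x)).length with
      | zero => exact absurd (List.length_eq_zero_iff.mp hl) hne
      | succ k => exact ⟨k, rfl⟩
    rw [hmc, hk, pv_update_replicate, if_pos h]
  · have he : orig.filter (pvP x) = [] := by
      rw [List.filter_eq_nil_iff]
      intro c hc
      simp only [pvMatch, List.any_eq_true, not_exists, not_and] at h
      simpa using h c hc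
    rw [he, if_neg h]
    rfl

-- A's flatMapped appends, consumed by Set.update, are a single conditional-add fold.
theorem pv_main (orig : List String) (l : List String) (s : PySem.Set String) :
    PySem.Set.update s (l.flatMap (fun x => (orig.filter (pvP x)).map (fun _ => x))) =
    l.foldl (fun res x => if pvMatch orig x then PySem.Set.add res x else res) s := by
  induction l generalizing s with
  | nil => rfl
  | cons x rest ih =>
      rw [List.flatMap_cons, PySem.Set.update_append, pv_update_block, ih, List.foldl_cons]

-- the prefix-enumeration test of B equals A's startswith scan (given the C(…] gate holds).
theorem pv_prefix_iff (orig : List String) (x : String) :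
    (∃ l ∈ PySem.List.pyRange 0 (PySem.Str.len x + 1) 1,
        PySem.Set.contains (PySem.Set.ofList orig) (PySem.Str.slice x none (some l)) = true)
    ↔ ∃ c ∈ orig, PySem.Str.startswith x c = true := by
  constructor
  · rintro ⟨l, hl, hc⟩
    have hl' := PySem.List.mem_pyRange_one.mp hl
    refine ⟨PySem.Str.slice x none (some l), ?_, ?_⟩
    · have := PySem.Set.contains_iff _ _ |>.mp hc
      simpa [PySem.Set.mem_ofList] using this
    · rw [PySem.Str.startswith_eq, PySem.Chars.startswith_iff, PySem.Str.toList_slice,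
        PySem.Chars.slice_eq_listSlice, PySem.List.slice_to _ hl'.1]
      exact List.take_prefix _ _
  · rintro ⟨c, hc, hsw⟩
    have hpre : c.toList <+: x.toList := by
      rw [PySem.Str.startswith_eq, PySem.Chars.startswith_iff] at hsw
      exact hsw
    have hlen : c.toList.length ≤ x.toList.length := hpre.length_le
    refine ⟨(c.toList.length : Int), ?_, ?_⟩
    · rw [PySem.List.mem_pyRange_one]
      constructor
      · exact Int.natCast_nonneg _
      · have : PySem.Str.len x = (x.toList.length : Int) := by
          simp [PySem.Str.len]
        rw [this]
        exact_mod_cast Nat.lt_succ_of_le hlen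
    · have hsl : PySem.Str.slice x none (some (c.toList.length : Int)) = c := by
        rw [← String.toList_inj, PySem.Str.toList_slice, PySem.Chars.slice_eq_listSlice,
          PySem.List.slice_to _ (Int.natCast_nonneg _)]
        simp only [Int.toNat_natCast]
        exact (List.prefix_iff_eq_take.mp hpre).symm
      rw [hsl, PySem.Set.contains_iff]
      simpa [PySem.Set.mem_ofList] using hc
  
-- B's whole test condition equals A's.
theorem pv_cond_eq (orig : List String) (x : String) :
    pvMatch orig x =
      (PySem.Set.contains (PySem.Set.ofList orig) x ||
        ((PySem.Str.startswith x "C(" && PySem.Str.endswith x "]") &&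
          (PySem.List.pyRange 0 (PySem.Str.len x + 1) 1).any
            (fun l => PySem.Set.contains (PySem.Set.ofList orig) (PySem.Str.slice x none (some l))))) := by
  rw [Bool.eq_iff_iff]
  simp only [pvMatch, pvP, List.any_eq_true, Bool.or_eq_true, Bool.and_eq_true, beq_iff_eq]
  constructor
  · rintro ⟨c, hc, hx | ⟨hsw, hg⟩⟩
    · left; rw [PySem.Set.contains_iff]; subst hx; simpa [PySem.Set.mem_ofList] using hc
    · right
      refine ⟨hg, ?_⟩
      rw [pv_prefix_iff]
      exact ⟨c, hc, hsw⟩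
  · rintro (hm | ⟨hg, hany⟩)
    · rw [PySem.Set.contains_iff] at hm
      simp only [PySem.Set.mem_ofList] at hm
      exact ⟨x, hm, Or.inl rfl⟩
    · obtain ⟨c, hc, hsw⟩ := (pv_prefix_iff orig x).mp hany
      exact ⟨c, hc, Or.inr ⟨hsw, hg⟩⟩

-- B's step function is the conditional-add fold step.
theorem pv_step_eq (orig : List String) (res : PySem.Set String) (x : String) :
    (if PySem.Set.contains (PySem.Set.ofList orig) x then PySem.Set.add res x
     else if PySem.Str.startswith x "C(" && PySem.Str.endswith x "]" then
       if (PySem.List.pyRange 0 (PySem.Str.len x + 1) 1).any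
            (fun l => PySem.Set.contains (PySem.Set.ofList orig) (PySem.Str.slice x none (some l))) then
         PySem.Set.add res x
       else res
     else res) =
    (if pvMatch orig x then PySem.Set.add res x else res) := by
  rw [pv_cond_eq]
  cases hm : PySem.Set.contains (PySem.Set.ofList orig) x <;>
    cases hg : (PySem.Str.startswith x "C(" && PySem.Str.endswith x "]") <;>
      cases ha : (PySem.List.pyRange 0 (PySem.Str.len x + 1) 1).any
        (fun l => PySem.Set.contains (PySem.Set.ofList orig) (PySem.Str.slice x none (some l))) <;>
      simp

-- ===== VERDICT (by name: the statement is the Claim_ definition above) =====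
theorem identify_full_ctrl_names_spec : Claim_equal_identify_full_ctrl_names := by
  intro X_vars orig _
  show identify_full_ctrl_names X_vars orig = identify_full_ctrl_names_alt X_vars orig
  simp only [identify_full_ctrl_names, identify_full_ctrl_names_alt]
  -- A's inner loop over orig appends a constant block per X_var
  have hinner : ∀ (acc : List String) (x : String),
      orig.foldl (fun acc c =>
        if x == c then acc ++ [x]
        else if PySem.Str.startswith x c &&
                (PySem.Str.startswith x "C(" && PySem.Str.endswith x "]") then
          acc ++ [x]
        else acc) acc = acc ++ (orig.filter (pvP x)).map (fun _ => x) := by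
    intro acc x
    have hfun : (fun (acc : List String) c =>
        if x == c then acc ++ [x]
        else if PySem.Str.startswith x c &&
                (PySem.Str.startswith x "C(" && PySem.Str.endswith x "]") then
          acc ++ [x]
        else acc) = fun acc c => if pvP x c then acc ++ [x] else acc := by
      funext a c
      simp only [pvP]
      by_cases h1 : (x == c) = true
      · simp [h1]
      · simp [h1]
    rw [hfun, PySem.List.foldl_append_if (pvP x) (fun _ => x)]
  have houter : (PySem.Set.ofList X_vars).foldl (fun acc x =>
      orig.foldl (fun acc c =>
        if x == c then acc ++ [x]
        else if PySem.Str.startswith x c &&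
                (PySem.Str.startswith x "C(" && PySem.Str.endswith x "]") then
          acc ++ [x]
        else acc) acc) [] =
      (PySem.Set.ofList X_vars).flatMap (fun x => (orig.filter (pvP x)).map (fun _ => x)) := by
    have : (fun (acc : List String) x =>
        orig.foldl (fun acc c =>
          if x == c then acc ++ [x]
          else if PySem.Str.startswith x c &&
                  (PySem.Str.startswith x "C(" && PySem.Str.endswith x "]") then
            acc ++ [x]
          else acc) acc) =
        fun acc x => acc ++ (orig.filter (pvP x)).map (fun _ => x) := by
      funext a x; exact hinner a x
    rw [this, PySem.List.foldl_append_eq_flatMap]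
    rfl
  rw [houter, ← PySem.Set.update_nil_left, pv_main]
  exact Eq.symm (PySem.List.foldl_congr_mem _ _ _ _ (fun acc x _ => pv_step_eq orig acc x))
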